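-- pv_equiv track=rewrite | github.com/TomasBahnik/pslib | python/alp/lectures/06/radix_sort_experiments.py | sort_by_digit
-- ===== SOURCE A (Python) =====
-- def digit(a,n):
--   """ n-tá číslice zprava čísla 'a', počítáno od nuly"""
--   return a//(10**n) % 10
--
-- def sort_by_digit(a,i):
--   """ setřídí pole 'a' dle i-té číslice """
--   prihradka=[ [] for j in range(10) ]
--   for x in a:
--     c=digit(x,i) # číslice pro třídění
--     prihradka[c]+=[x]
--   r=[]
--   for p in prihradka:
--     r+=p
--   return r
-- ===== SOURCE B (Python) =====
-- def digit(a, n):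
--     """ n-ta cislice zprava cisla 'a', pocitano od nuly """
--     return a // (10 ** n) % 10
--
-- def sort_by_digit(a, i):
--     """ setridi pole 'a' dle i-te cislice """
--     keyed = [(digit(x, i), x) for x in a]
--     return [x for d in range(10) for (k, x) in keyed if k == d]
-- ===== Notes on version B (the rewrite author's own statement) =====
-- stated objective: simpler
-- what changed: Instead of distributing elements into ten mutable buckets and concatenating them, B computes each element's key once into a keyed list and emits one filtering pass over it per digit value (a flat comprehension over range(10)), with no bucket structure.
import Mathlib
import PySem

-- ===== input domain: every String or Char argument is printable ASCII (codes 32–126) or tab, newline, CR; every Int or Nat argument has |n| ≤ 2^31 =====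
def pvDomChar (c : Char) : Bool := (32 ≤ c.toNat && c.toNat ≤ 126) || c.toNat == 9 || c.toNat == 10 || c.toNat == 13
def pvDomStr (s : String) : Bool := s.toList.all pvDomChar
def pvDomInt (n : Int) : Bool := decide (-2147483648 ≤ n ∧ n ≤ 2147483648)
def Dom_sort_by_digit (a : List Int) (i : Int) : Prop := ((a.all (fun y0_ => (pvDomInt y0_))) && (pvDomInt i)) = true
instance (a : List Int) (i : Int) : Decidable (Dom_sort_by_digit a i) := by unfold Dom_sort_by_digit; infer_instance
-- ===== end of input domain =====

-- B replaces the ten mutable buckets + concatenation of A by one filtering pass per digit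
-- value (a flat comprehension); objective: simpler.

-- ===== PORT A =====
-- shared helper `digit` (both Python versions define the identical helper):
-- a // (10 ** n) % 10; exact for n ≥ 0 (guaranteed by Pre_ whenever digit is reached)
def pvDigit (a n : Int) : Int :=
  PySem.Int.mod (PySem.Int.floordiv a (10 ^ n.toNat)) 10

def sort_by_digit (a : List Int) (i : Int) : List Int :=
  let prihradka : List (List Int) := (PySem.List.pyRange 0 10 1).map (fun _ => [])
  let prihradka := a.foldl (fun pr x =>
    let c := pvDigit x i
    pr.set c.toNat (pr.getD c.toNat [] ++ [x])) prihradka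
  prihradka.foldl (fun r p => r ++ p) []

-- ===== PORT B =====
def sort_by_digit_alt (a : List Int) (i : Int) : List Int :=
  let keyed := a.map (fun x => (pvDigit x i, x))
  (PySem.List.pyRange 0 10 1).flatMap (fun d =>
    (keyed.filter (fun kx => kx.1 == d)).map (fun kx => kx.2))

-- ===== PRECONDITION & SPEC =====
-- Pre_ excludes nonempty a with i < 0: there Python A raises TypeError
-- (10 ** i is a float, so prihradka[c] indexes a list with a float).
def Pre_sort_by_digit (a : List Int) (i : Int) : Prop := a = [] ∨ 0 ≤ i
instance (a : List Int) (i : Int) : Decidable (Pre_sort_by_digit a i) := by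
  unfold Pre_sort_by_digit; infer_instance

def pvWitness_sort_by_digit : List Int × Int := ([170, 45, 75, 90, 2, 24, 802, 66], 1)

def Spec_sort_by_digit (a : List Int) (i : Int) (out : List Int) : Prop := out = sort_by_digit_alt a i
instance (a : List Int) (i : Int) (out : List Int) : Decidable (Spec_sort_by_digit a i out) := by unfold Spec_sort_by_digit; infer_instance

-- ===== CLAIM (what is proved, stated in full; the proofs are below) =====
def Claim_equal_sort_by_digit : Prop := ∀ (a : List Int) (i : Int), Dom_sort_by_digit a i → Pre_sort_by_digit a i → Spec_sort_by_digit a i (sort_by_digit a i)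

-- ===== LEMMAS AND PROOFS =====

lemma pvDigit_nonneg (x i : Int) : 0 ≤ pvDigit x i := by
  unfold pvDigit
  rw [PySem.Int.mod_eq_emod_of_pos (by norm_num : (0:Int) < 10)]
  exact Int.emod_nonneg _ (by norm_num)

lemma pvDigit_lt (x i : Int) : pvDigit x i < 10 := by
  unfold pvDigit
  rw [PySem.Int.mod_eq_emod_of_pos (by norm_num : (0:Int) < 10)]
  exact Int.emod_lt_of_pos _ (by norm_num)

-- invariant of A's distributing fold: bucket j accumulates the elements with digit j
lemma fold_buckets (i : Int) (a : List Int) (pr : List (List Int)) (h : pr.length = 10) :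
    a.foldl (fun pr x => pr.set (pvDigit x i).toNat
        (pr.getD (pvDigit x i).toNat [] ++ [x])) pr
      = (List.range 10).map
          (fun j => pr.getD j [] ++ a.filter (fun x => pvDigit x i == (j : Int))) := by
  induction a generalizing pr with
  | nil =>
    simp only [List.foldl_nil, List.filter_nil, List.append_nil]
    refine (List.ext_getElem ?_ ?_).symm
    · simp [h]
    · intro k hk1 hk2
      simp only [List.getElem_map, List.getElem_range]
      rw [List.getD_eq_getElem _ _ (by simp at hk1; omega)]
  | cons x a ih =>
    have hd0 := pvDigit_nonneg x i
    have hd1 := pvDigit_lt x i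
    rw [List.foldl_cons, ih _ (by simp [h])]
    refine List.map_congr_left ?_
    intro j hj
    have hj10 : j < 10 := by simpa using hj
    rw [List.getD_eq_getElem _ _ (by simp [h]; omega), List.getElem_set]
    by_cases hc : (pvDigit x i).toNat = j
    · have hcj : pvDigit x i = (j : Int) := by omega
      rw [if_pos hc, hc]
      simp [hcj]
    · have hcj : pvDigit x i ≠ (j : Int) := by omega
      have hg : pr.getD j [] = pr[j] := List.getD_eq_getElem pr [] (show j < pr.length by omega)
      rw [if_neg hc, hg]
      simp [hcj]

lemma foldl_append_eq_flatMap_id (l : List (List Int)) :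
    l.foldl (fun r p => r ++ p) [] = l.flatMap id := by
  suffices h : ∀ r : List Int, l.foldl (fun r p => r ++ p) r = r ++ l.flatMap id by
    simpa using h []
  induction l with
  | nil => simp
  | cons p l ih => intro r; simp [ih, List.append_assoc]

-- ===== VERDICT (by name: the statement is the Claim_ definition above) =====
theorem sort_by_digit_spec : Claim_equal_sort_by_digit := by
  intro a i _ _
  show sort_by_digit a i = sort_by_digit_alt a i
  have hr : PySem.List.pyRange 0 10 1 = [0,1,2,3,4,5,6,7,8,9] := by decide
  simp only [sort_by_digit, sort_by_digit_alt, hr]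
  simp only [List.filter_map, List.map_map, Function.comp_def]
  rw [fold_buckets i a _ (by simp), foldl_append_eq_flatMap_id]
  simp [List.range_succ, List.getD]
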